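-- pv_equiv track=rewrite | github.com/ArashiPrime/bookbot | main-pairs.py | count_first_two_letters
-- ===== SOURCE A (Python) =====
-- def count_first_two_letters(text):
--     # Dictionary to store frequency of starting letter pairs
--     letter_pairs_dict = {}
--
--     words = text.split()
--
--     for word in words:
--         # Normalize to lowercase to combine cases like 'Th' and 'th'
--         word = word.lower()
--         if len(word) >= 2:
--             first_two = word[:2]
--             # Only count pairs of letters, not numbers or symbols
--             if first_two.isalpha():
--                 if first_two in letter_pairs_dict:
--                     letter_pairs_dict[first_two] += 1
--                 else:
--                     letter_pairs_dict[first_two] = 1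
--     return letter_pairs_dict
-- ===== SOURCE B (Python) =====
-- def count_first_two_letters(text):
--     # Recursive count-by-removal: take the first remaining prefix, count its
--     # copies by removing all of them, then recurse on what is left.  Produces
--     # first-occurrence order like A's dict without an incremental counter.
--     def tally(prefixes):
--         if not prefixes:
--             return {}
--         first = prefixes[0]
--         rest = prefixes[1:]
--         remaining = [p for p in rest if p != first]
--         counts = {first: 1 + len(rest) - len(remaining)}
--         counts.update(tally(remaining))
--         return counts
--
--     prefixes = []
--     for word in text.split():
--         w = word.lower()
--         if len(w) >= 2 and w[:2].isalpha():
--             prefixes.append(w[:2])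
--     return tally(prefixes)
-- ===== Notes on version B (the rewrite author's own statement) =====
-- stated objective: alternative
-- what changed: Replaces A's incremental dict-counting loop (membership test + insert/increment per word) with a recursive count-by-removal over the collected prefixes: take the first remaining prefix, count its copies by filtering them all out, and recurse on what is left, which reproduces first-occurrence order without maintaining a counter dict.
import Mathlib
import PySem

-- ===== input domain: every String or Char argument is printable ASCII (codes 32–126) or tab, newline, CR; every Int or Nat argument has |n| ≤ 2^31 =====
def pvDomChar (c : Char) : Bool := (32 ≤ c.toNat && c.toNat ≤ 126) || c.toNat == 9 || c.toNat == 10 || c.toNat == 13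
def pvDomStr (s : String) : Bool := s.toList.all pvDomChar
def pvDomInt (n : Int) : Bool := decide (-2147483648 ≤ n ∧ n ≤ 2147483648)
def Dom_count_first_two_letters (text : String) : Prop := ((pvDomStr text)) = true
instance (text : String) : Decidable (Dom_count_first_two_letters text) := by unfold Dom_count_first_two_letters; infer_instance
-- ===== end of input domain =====

-- B replaces A's incremental dict-counting pass by a recursive count-by-removal
-- over the collected prefixes (alternative decomposition, same result).

-- ===== PORT A =====
def count_first_two_letters (text : String) : List (String × Int) :=
  let words := PySem.Str.split₀ text
  (words.foldl (fun d word =>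
      let w := PySem.Str.lower word
      if 2 ≤ PySem.Str.len w then
        let first_two := PySem.Str.slice w none (some 2)
        if PySem.Str.strIsalpha first_two then
          if d.contains first_two then d.insert first_two (d.getD first_two 0 + 1)
          else d.insert first_two 1
        else d
      else d) (PySem.Dict.empty : PySem.Dict String Int)).items

-- ===== PORT B =====
-- tally: the dict literal {first: cnt} updated with tally(remaining), whose keys are
-- all ≠ first (they survive the ≠-filter), so the update appends: exact as a cons here.
def pvTally : List String → List (String × Int)
  | [] => []
  | first :: rest =>
    (first, 1 + (rest.length : Int) - ((rest.filter (fun p => p != first)).length : Int)) ::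
      pvTally (rest.filter (fun p => p != first))
termination_by l => l.length
decreasing_by
  simp only [List.length_cons, List.unattach_filter, List.unattach_attach]
  exact Nat.lt_succ_of_le (List.length_filter_le _ _)

def count_first_two_letters_alt (text : String) : List (String × Int) :=
  let prefixes := (PySem.Str.split₀ text).foldl (fun acc word =>
      let w := PySem.Str.lower word
      if 2 ≤ PySem.Str.len w && PySem.Str.strIsalpha (PySem.Str.slice w none (some 2)) then
        acc ++ [PySem.Str.slice w none (some 2)]
      else acc) []
  pvTally prefixes

-- ===== PRECONDITION & SPEC =====
def Spec_count_first_two_letters (text : String) (out : List (String × Int)) : Prop := out = count_first_two_letters_alt text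
instance (text : String) (out : List (String × Int)) : Decidable (Spec_count_first_two_letters text out) := by unfold Spec_count_first_two_letters; infer_instance

-- ===== CLAIM (what is proved, stated in full; the proofs are below) =====
def Claim_equal_count_first_two_letters : Prop := ∀ (text : String), Dom_count_first_two_letters text → Spec_count_first_two_letters text (count_first_two_letters text)

-- ===== LEMMAS AND PROOFS =====

-- the prefix a word contributes to the count (if any)
def pvPref? (word : String) : Option String :=
  let w := PySem.Str.lower word
  if 2 ≤ PySem.Str.len w then
    if PySem.Str.strIsalpha (PySem.Str.slice w none (some 2)) then
      some (PySem.Str.slice w none (some 2))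
    else none
  else none

-- A's loop body is the uniform counter step on pvPref?
lemma pvStepA_eq (d : PySem.Dict String Int) (word : String) :
    (let w := PySem.Str.lower word
     if 2 ≤ PySem.Str.len w then
       let first_two := PySem.Str.slice w none (some 2)
       if PySem.Str.strIsalpha first_two then
         if d.contains first_two then d.insert first_two (d.getD first_two 0 + 1)
         else d.insert first_two 1
       else d
     else d) =
    (match pvPref? word with
     | some p => d.insert p (d.getD p 0 + 1)
     | none => d) := by
  dsimp only [pvPref?]
  by_cases h1 : 2 ≤ PySem.Str.len (PySem.Str.lower word)
  · rw [if_pos h1, if_pos h1]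
    by_cases h2 : PySem.Str.strIsalpha (PySem.Str.slice (PySem.Str.lower word) none (some 2)) = true
    · rw [if_pos h2, if_pos h2]
      by_cases hc : d.contains (PySem.Str.slice (PySem.Str.lower word) none (some 2)) = true
      · rw [if_pos hc]
      · rw [if_neg hc]
        show _ = d.insert _ (d.getD _ 0 + 1)
        rw [PySem.Dict.getD_of_not_contains _ _ (by simpa using hc), zero_add]
    · rw [if_neg h2, if_neg h2]
  · rw [if_neg h1, if_neg h1]

-- A's whole loop is the counter fold over the contributed prefixes
lemma pvFoldA_eq (ws : List String) (d : PySem.Dict String Int) :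
    ws.foldl (fun d word =>
      let w := PySem.Str.lower word
      if 2 ≤ PySem.Str.len w then
        let first_two := PySem.Str.slice w none (some 2)
        if PySem.Str.strIsalpha first_two then
          if d.contains first_two then d.insert first_two (d.getD first_two 0 + 1)
          else d.insert first_two 1
        else d
      else d) d =
    (ws.filterMap pvPref?).foldl (fun d x => d.insert x (d.getD x 0 + 1)) d := by
  induction ws generalizing d with
  | nil => rfl
  | cons w ws ih =>
    rw [List.foldl_cons, List.filterMap_cons, pvStepA_eq]
    cases h : pvPref? w
    · exact ih d
    · exact ih _

-- B's collection loop gathers exactly the contributed prefixes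
lemma pvFoldB_eq (ws : List String) (acc : List String) :
    ws.foldl (fun acc word =>
      let w := PySem.Str.lower word
      if 2 ≤ PySem.Str.len w && PySem.Str.strIsalpha (PySem.Str.slice w none (some 2)) then
        acc ++ [PySem.Str.slice w none (some 2)]
      else acc) acc = acc ++ ws.filterMap pvPref? := by
  induction ws generalizing acc with
  | nil => simp
  | cons w ws ih =>
    rw [List.foldl_cons, List.filterMap_cons]
    dsimp only [pvPref?]
    by_cases h1 : 2 ≤ PySem.Str.len (PySem.Str.lower w)
    · by_cases h2 : PySem.Str.strIsalpha (PySem.Str.slice (PySem.Str.lower w) none (some 2)) = true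
      · rw [if_pos (by simp only [Bool.and_eq_true, decide_eq_true_eq]; exact ⟨h1, h2⟩), if_pos h1, if_pos h2, ih]
        simp
      · rw [if_neg (by simp only [Bool.and_eq_true, decide_eq_true_eq, not_and]; exact fun _ => h2), if_pos h1, if_neg h2, ih]
    · rw [if_neg (by simp only [Bool.and_eq_true, decide_eq_true_eq, not_and]; exact fun h => absurd h h1), if_neg h1, ih]

-- PySem.Set.discard is a filter (definitional)
lemma pvDiscard_eq (s : List String) (x : String) :
    PySem.Set.discard s x = s.filter (fun q => q != x) := rfl

lemma pvFilter_idem (s : List String) (a : String) :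
    (s.filter (fun q => q != a)).filter (fun q => q != a) = s.filter (fun q => q != a) := by
  rw [List.filter_filter]
  exact List.filter_congr fun x _ => Bool.and_self _

lemma pvFilter_comm (s : List String) (a b : String) :
    (s.filter (fun q => q != a)).filter (fun q => q != b)
      = (s.filter (fun q => q != b)).filter (fun q => q != a) := by
  rw [List.filter_filter, List.filter_filter]
  exact List.filter_congr fun x _ => Bool.and_comm _ _

-- removing p commutes with taking first occurrences
lemma pvFilter_ofList (p : String) (rest : List String) :
    (PySem.Set.ofList rest).filter (fun q => q != p)
      = PySem.Set.ofList (rest.filter (fun q => q != p)) := by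
  induction rest with
  | nil => rfl
  | cons q t ih =>
    rw [PySem.Set.ofList_cons, pvDiscard_eq]
    by_cases hq : q = p
    · subst hq
      rw [List.filter_cons_of_neg (by simp), List.filter_cons_of_neg (by simp),
          pvFilter_idem, ih]
    · rw [List.filter_cons_of_pos (by simp [hq]), List.filter_cons_of_pos (by simp [hq]),
          pvFilter_comm, ih, PySem.Set.ofList_cons, pvDiscard_eq]

-- the distinct elements of p :: rest are p followed by the distinct elements of rest without p
lemma pvOfList_cons_filter (p : String) (rest : List String) :
    PySem.Set.ofList (p :: rest) = p :: PySem.Set.ofList (rest.filter (fun q => q != p)) := by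
  rw [PySem.Set.ofList_cons, pvDiscard_eq, pvFilter_ofList]

-- recursive count-by-removal computes Counter(l).items (first-occurrence order, counts)
lemma pvTally_eq (l : List String) :
    pvTally l = (PySem.Set.ofList l).map (fun k => (k, (l.count k : Int))) := by
  induction l using pvTally.induct with
  | case1 => simp [pvTally]
  | case2 first rest ih =>
    simp only [List.unattach_filter, List.unattach_attach] at ih
    rw [pvTally, pvOfList_cons_filter, List.map_cons]
    congr 1
    · -- head: 1 + |rest| - |rest without first| = count of first in first :: rest
      have hlen := List.length_eq_length_filter_add (l := rest) (fun p => p != first)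
      have hcnt : (rest.filter (fun p => !(p != first))).length = rest.count first := by
        rw [List.count, List.countP_eq_length_filter]
        exact congrArg List.length (List.filter_congr fun x _ => by cases h : x == first <;> simp [bne, h])
      rw [hcnt] at hlen
      simp only [Prod.mk.injEq, List.count_cons_self]
      refine ⟨trivial, ?_⟩
      push_cast [hlen]
      ring
    · rw [ih]
      refine List.map_congr_left (fun k hk => ?_)
      have hkr : k ∈ rest.filter (fun q => q != first) :=
        (PySem.Set.mem_ofList (xs := rest.filter (fun q => q != first)) (y := k)).mp hk
      have hne : (k != first) = true := (List.mem_filter.mp hkr).2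
      rw [List.count_cons_of_ne (Ne.symm (by simpa using hne))]
      simp only [Prod.mk.injEq, true_and]
      exact congrArg _ (List.count_filter (p := fun x => x != first) hne)

-- ===== VERDICT (by name: the statement is the Claim_ definition above) =====
theorem count_first_two_letters_spec : Claim_equal_count_first_two_letters := by
  intro text _
  show count_first_two_letters text = count_first_two_letters_alt text
  simp only [count_first_two_letters, count_first_two_letters_alt]
  rw [pvFoldA_eq, pvFoldB_eq, List.nil_append,
      PySem.Dict.foldl_insert_getD_add_one_eq_counter, PySem.Dict.items_counter,
      pvTally_eq]
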